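-- pv_equiv track=rewrite | github.com/YerongLi/dive | codesignal/lastCheckingTime/main.py | solution
-- ===== SOURCE A (Python) =====
-- from collections import deque
--
-- def solution(times):
--     ans = -0x7f7f7f7f
--     q = deque()
--     for time in times:
--         while q and q[0] < time: q.popleft()
--         starttime = time
--         if q : starttime = max(time, q[-1])
--         finishtime = starttime + 300
--         ans = max(ans, finishtime)
--         q.append(finishtime)
--     return ans
-- ===== SOURCE B (Python) =====
-- def solution(times):
--     ans = -0x7f7f7f7f
--     last = None
--     for time in times:
--         start = time if last is None else max(time, last)
--         finish = start + 300
--         ans = max(ans, finish)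
--         last = finish
--     return ans
-- ===== Notes on version B (the rewrite author's own statement) =====
-- stated objective: simpler
-- what changed: Replaced the deque and its inner popleft while-loop with a single 'last finish time' variable: since finish times are monotonically increasing, only the most recent finish matters.
import Mathlib
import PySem

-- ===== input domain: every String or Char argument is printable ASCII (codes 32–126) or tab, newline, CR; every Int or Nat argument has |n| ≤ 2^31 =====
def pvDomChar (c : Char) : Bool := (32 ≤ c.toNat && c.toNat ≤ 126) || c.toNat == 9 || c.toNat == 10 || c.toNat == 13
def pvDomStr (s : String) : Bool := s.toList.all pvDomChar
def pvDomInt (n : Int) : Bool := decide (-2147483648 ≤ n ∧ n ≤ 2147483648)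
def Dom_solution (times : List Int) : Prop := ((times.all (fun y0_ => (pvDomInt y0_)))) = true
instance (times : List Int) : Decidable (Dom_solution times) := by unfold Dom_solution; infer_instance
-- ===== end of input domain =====

-- B replaces A's deque and inner popleft loop with one 'last finish' variable (simpler, same result).


-- ===== PORT A =====
-- 'while q and q[0] < time: q.popleft()'
def popLoop (q : List Int) (t : Int) : List Int :=
  match q with
  | [] => []
  | x :: xs => if x < t then popLoop xs t else x :: xs

def stepA (s : Int × List Int) (time : Int) : Int × List Int :=
  let q := popLoop s.2 time
  let starttime := match q.getLast? with
    | some l => max time l   -- 'if q: starttime = max(time, q[-1])'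
    | none => time
  let finishtime := starttime + 300
  (max s.1 finishtime, q ++ [finishtime])

def solution (times : List Int) : Int :=
  (times.foldl stepA (-2139062143, [])).1

-- ===== PORT B =====
def stepB (s : Int × Option Int) (time : Int) : Int × Option Int :=
  let start := match s.2 with
    | none => time
    | some l => max time l
  let finish := start + 300
  (max s.1 finish, some finish)

def solution_alt (times : List Int) : Int :=
  (times.foldl stepB (-2139062143, none)).1

-- ===== PRECONDITION & SPEC =====
def Spec_solution (times : List Int) (out : Int) : Prop := out = solution_alt times
instance (times : List Int) (out : Int) : Decidable (Spec_solution times out) := by unfold Spec_solution; infer_instance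

-- ===== CLAIM (what is proved, stated in full; the proofs are below) =====
def Claim_equal_solution : Prop := ∀ (times : List Int), Dom_solution times → Spec_solution times (solution times)

-- ===== LEMMAS AND PROOFS =====

-- popLoop returns either [] (all elements were < t) or a nonempty suffix with the same last.
lemma popLoop_empty_last (q : List Int) (t : Int) (h : popLoop q t = []) :
    ∀ x ∈ q, x < t := by
  induction q with
  | nil => simp
  | cons x xs ih =>
    unfold popLoop at h
    by_cases hx : x < t
    · rw [if_pos hx] at h
      intro y hy
      rcases List.mem_cons.mp hy with rfl | hy'
      · exact hx
      · exact ih h y hy'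
    · rw [if_neg hx] at h; simp at h

lemma popLoop_getLast? (q : List Int) (t : Int) (h : popLoop q t ≠ []) :
    (popLoop q t).getLast? = q.getLast? := by
  induction q with
  | nil => simp [popLoop] at h
  | cons x xs ih =>
    unfold popLoop at h ⊢
    by_cases hx : x < t
    · rw [if_pos hx] at h ⊢
      have hxs : xs ≠ [] := by
        intro he; subst he; simp [popLoop] at h
      rw [ih h]
      cases xs with
      | nil => simp at hxs
      | cons y ys => simp [List.getLast?_cons_cons]
    · rw [if_neg hx]

-- the two starttime computations agree when last = q.getLast?
lemma step_agree (q : List Int) (t : Int) :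
    (match (popLoop q t).getLast? with
      | some l => max t l
      | none => t) =
    (match q.getLast? with
      | none => t
      | some l => max t l) := by
  by_cases h : popLoop q t = []
  · rw [h]
    cases hq : q.getLast? with
    | none => rfl
    | some l =>
      have hl : l ∈ q := List.mem_of_getLast? hq
      have := popLoop_empty_last q t h l hl
      simp [max_eq_left (le_of_lt this)]
  · rw [popLoop_getLast? q t h]
    cases q.getLast? <;> rfl

-- invariant: same ans, and B's 'last' equals the last of A's queue
lemma fold_agree (ts : List Int) (a : Int) (q : List Int) :
    (ts.foldl stepA (a, q)).1 = (ts.foldl stepB (a, q.getLast?)).1 := by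
  induction ts generalizing a q with
  | nil => rfl
  | cons t ts ih =>
    simp only [List.foldl_cons]
    have hst : stepA (a, q) t =
        ((stepB (a, q.getLast?) t).1, popLoop q t ++ [(match q.getLast? with
          | none => t | some l => max t l) + 300]) := by
      simp only [stepA, stepB, step_agree q t]
    rw [hst]
    have : (popLoop q t ++ [(match q.getLast? with
        | none => t | some l => max t l) + 300]).getLast? =
        some ((match q.getLast? with | none => t | some l => max t l) + 300) := by
      simp
    have hB : stepB (a, q.getLast?) t =
        ((stepB (a, q.getLast?) t).1,
         some ((match q.getLast? with | none => t | some l => max t l) + 300)) := by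
      simp only [stepB]
    rw [ih]
    rw [this, ← hB]

-- ===== VERDICT (by name: the statement is the Claim_ definition above) =====
theorem solution_spec : Claim_equal_solution := by
  intro times _
  show solution times = solution_alt times
  unfold solution solution_alt
  simpa using fold_agree times (-2139062143) []
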